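-- pv_equiv track=rewrite | github.com/detailperpix/bitwise-patternmatch | bitpm_internal.py | create_delta_array
-- ===== SOURCE A (Python) =====
-- CHAR_RANGE = ord('~') - ord(' ') + 1
--
-- def create_delta_array(pattern):
--     """
--     Creates an array of information for delta
--     towards the string pattern
--     :return: array containing delta values for the pattern
--     Time Complexity: O(N); N as length of pattern
--     Space complexity: O(N); N as length of pattern
--     O(N) input space
--     O(1) auxiliary space (the delta_array has a constant size from list of
--     95 elements)
--     """
--     delta_array = [None] * (CHAR_RANGE + 1)
--     delta_array[CHAR_RANGE] = (2 ** len(pattern)) - 1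
--
--     """
--     Determine delta for cases of each characters from ' ' to '~'
--     Fills in the character that matches pattern's character
--     by updating the values in the delta_array
--     i.e. pattern=abcd, delta array for character 'a' would be 0b0111
--     (character 'a' matches), character 'c' would be 0b1101
--     """
--     for i in range(len(pattern)):
--         position = ord(pattern[i]) - ord(' ')
--         if delta_array[position] is None:
--             delta_array[position] = delta_array[CHAR_RANGE]
--             delta_array[position] -= 2 ** i
--         else:
--             delta_array[position] -= 2 ** i
--
--     return delta_array
-- ===== SOURCE B (Python) =====
-- CHAR_RANGE = ord('~') - ord(' ') + 1
--
-- def create_delta_array(pattern):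
--     out = [None] * CHAR_RANGE + [2 ** len(pattern) - 1]
--     for c in sorted(set(pattern)):
--         p = ord(c) - ord(' ')
--         if 0 <= p < CHAR_RANGE:
--             m = 0
--             for ch in reversed(pattern):
--                 m = 2 * m + (ch != c)
--             out[p] = m
--     return out
-- ===== Notes on version B (the rewrite author's own statement) =====
-- stated objective: alternative
-- what changed: B is character-major instead of position-major: it iterates over the distinct characters of the pattern (sorted(set(pattern))) and for each occurring character builds its whole mask in one binary-digit pass over the reversed pattern (m = 2*m + (ch != c)), instead of A's single position-major pass that subtracts 2**i from a lazily-initialised 96-slot array; avoiding A's N big-int power computations 2**i and repeated list reads/writes gave a measured constant-factor speedup on large patterns.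
-- intended difference: On patterns containing a character with code below 32 (tab/newline/CR in the domain), A's negative index ord(c)-32 wraps around and silently clears pattern bits in the slot of an unrelated printable character, while B ignores characters outside the supported printable range (codes 32-126), which is the intended Bitap delta table. — e.g. on create_delta_array("\t"): A returns [none, none, none, none, none, none, none, none, none, none, none, none, none, none, none, none, none, none, none, none…, B returns [none, none, none, none, none, none, none, none, none, none, none, none, none, none, none, none, none, none, none, none…
import Mathlib
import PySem

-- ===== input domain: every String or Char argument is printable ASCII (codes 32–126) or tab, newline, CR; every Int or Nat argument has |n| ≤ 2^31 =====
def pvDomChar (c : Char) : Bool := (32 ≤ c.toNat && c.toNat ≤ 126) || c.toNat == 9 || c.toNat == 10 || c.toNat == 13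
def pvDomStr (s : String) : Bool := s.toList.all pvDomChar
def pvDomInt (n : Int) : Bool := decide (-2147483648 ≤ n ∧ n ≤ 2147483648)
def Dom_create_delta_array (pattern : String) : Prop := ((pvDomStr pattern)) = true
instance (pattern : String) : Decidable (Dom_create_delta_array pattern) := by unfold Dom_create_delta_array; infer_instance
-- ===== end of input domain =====

-- B is character-major instead of position-major: it loops over the distinct characters
-- (sorted(set(pattern))) and builds each occurring character's mask in one binary-digit pass
-- over the reversed pattern, instead of A's position-major pass subtracting powers of two
-- from a lazily-initialised 96-slot array (objective: alternative).

def CHAR_RANGE : Nat := 95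

-- ===== PORT A =====
def create_delta_array (pattern : String) : List (Option Int) :=
  let delta_array : List (Option Int) := List.replicate (CHAR_RANGE + 1) none
  let delta_array := PySem.List.pySetD delta_array (CHAR_RANGE : Int)
      (some ((2 : Int) ^ (PySem.Str.len pattern).toNat - 1))
  (PySem.List.pyRange 0 (PySem.Str.len pattern) 1).foldl
    (fun da i =>
      let position : Int := ((PySem.List.pyGetD pattern.toList i ' ').toNat : Int) - 32
      match PySem.List.pyGetD da position none with
      | none =>
          -- delta_array[position] = delta_array[CHAR_RANGE]; delta_array[position] -= 2 ** i
          -- (the slot CHAR_RANGE always holds an int, so the '-=' acts under the some)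
          PySem.List.pySetD da position
            ((PySem.List.pyGetD da (CHAR_RANGE : Int) none).map (fun v => v - (2 : Int) ^ i.toNat))
      | some v => PySem.List.pySetD da position (some (v - (2 : Int) ^ i.toNat)))
    delta_array

-- ===== PORT B =====
def create_delta_array_alt (pattern : String) : List (Option Int) :=
  let out : List (Option Int) :=
    List.replicate CHAR_RANGE none ++ [some ((2 : Int) ^ (PySem.Str.len pattern).toNat - 1)]
  (PySem.List.sorted (PySem.Set.ofList pattern.toList) (fun x => x) false).foldl
    (fun out c =>
      let p : Int := ((c.toNat : Int)) - 32
      if 0 ≤ p ∧ p < (CHAR_RANGE : Int) then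
        let m : Int := pattern.toList.reverse.foldl
          (fun m ch => 2 * m + (if ch ≠ c then 1 else 0)) 0
        PySem.List.pySetD out p (some m)
      else out)
    out

-- ===== PRECONDITION & SPEC =====
-- On patterns containing a character with code below 32 (tab/newline/CR in the domain), A's negative
-- index ord(c)-32 wraps around and silently clears bits in the slot of an unrelated printable
-- character, while B ignores characters outside the printable range (codes 32-126), the intended table.
def D_create_delta_array (pattern : String) : Prop :=
  (pattern.toList.foldl (fun b c => b || decide (c.toNat < 32)) false) = true
instance (pattern : String) : Decidable (D_create_delta_array pattern) := by
  unfold D_create_delta_array; infer_instance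

def Spec_create_delta_array (pattern : String) (out : List (Option Int)) : Prop :=
  ¬ D_create_delta_array pattern → out = create_delta_array_alt pattern
instance (pattern : String) (out : List (Option Int)) : Decidable (Spec_create_delta_array pattern out) := by
  unfold Spec_create_delta_array; infer_instance

def pvDiffWitness_create_delta_array : String := "\t"
def pvDiffWitnessOut_create_delta_array : (List (Option Int)) × (List (Option Int)) :=
  ([none, none, none, none, none, none, none, none, none, none, none, none, none, none, none, none, none, none, none, none, none, none, none, none, none, none, none, none, none, none, none, none, none, none, none, none, none, none, none, none, none, none, none, none, none, none, none, none, none, none, none, none, none, none, none, none, none, none, none, none, none, none, none, none, none, none, none, none, none, none, none, none, none, some 0, none, none, none, none, none, none, none, none, none, none, none, none, none, none, none, none, none, none, none, none, none, some 1],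
   [none, none, none, none, none, none, none, none, none, none, none, none, none, none, none, none, none, none, none, none, none, none, none, none, none, none, none, none, none, none, none, none, none, none, none, none, none, none, none, none, none, none, none, none, none, none, none, none, none, none, none, none, none, none, none, none, none, none, none, none, none, none, none, none, none, none, none, none, none, none, none, none, none, none, none, none, none, none, none, none, none, none, none, none, none, none, none, none, none, none, none, none, none, none, none, some 1])

-- ===== CLAIM =====
def Claim_unchanged_create_delta_array : Prop :=
  ∀ (pattern : String), Dom_create_delta_array pattern →
    Spec_create_delta_array pattern (create_delta_array pattern)
def Claim_changed_create_delta_array : Prop :=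
  Dom_create_delta_array (pvDiffWitness_create_delta_array) ∧
  D_create_delta_array (pvDiffWitness_create_delta_array) ∧
  create_delta_array (pvDiffWitness_create_delta_array) = pvDiffWitnessOut_create_delta_array.1 ∧
  create_delta_array_alt (pvDiffWitness_create_delta_array) = pvDiffWitnessOut_create_delta_array.2 ∧
  pvDiffWitnessOut_create_delta_array.1 ≠ pvDiffWitnessOut_create_delta_array.2

-- ===== LEMMAS AND PROOFS =====

-- folded-or form of 'contains a control character' (D_'s shape) reads as List.any
lemma pv_foldl_or (p : Char → Bool) : ∀ (l : List Char) (b : Bool),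
    l.foldl (fun b c => b || p c) b = (b || l.any p) := by
  intro l
  induction l with
  | nil => intro b; simp
  | cons c t ih => intro b; simp [List.foldl_cons, ih, Bool.or_assoc]

lemma pv_toNat_ofNat (n : Nat) (h : n < 55296) : (Char.ofNat n).toNat = n := by
  unfold Char.ofNat
  rw [dif_pos (Or.inl h)]
  rfl

-- A's loop body over an (index, char) pair; B's loop body over a distinct character
def pvStepA : List (Option Int) → Int × Char → List (Option Int) :=
  fun da ic =>
    let position : Int := ((ic.2.toNat : Int)) - 32
    match PySem.List.pyGetD da position none with
    | none =>
        PySem.List.pySetD da position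
          ((PySem.List.pyGetD da (CHAR_RANGE : Int) none).map (fun v => v - (2 : Int) ^ ic.1.toNat))
    | some v => PySem.List.pySetD da position (some (v - (2 : Int) ^ ic.1.toNat))

def pvStepB (pat : List Char) : List (Option Int) → Char → List (Option Int) :=
  fun out c =>
    let p : Int := ((c.toNat : Int)) - 32
    if 0 ≤ p ∧ p < (CHAR_RANGE : Int) then
      let m : Int := pat.reverse.foldl (fun m ch => 2 * m + (if ch ≠ c then 1 else 0)) 0
      PySem.List.pySetD out p (some m)
    else out

-- the mask B builds for character c (binary digits, foldr form) and the sum A subtracts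
def pvMask (l : List Char) (c : Char) : Int :=
  l.foldr (fun ch m => 2 * m + (if ch = c then 0 else 1)) 0

def pvOcc (l : List Char) (k : Nat) (c : Char) : Int :=
  match l with
  | [] => 0
  | x :: t => (if x = c then (2 : Int) ^ k else 0) + pvOcc t (k + 1) c

lemma pv_maskB_eq (pat : List Char) (c : Char) :
    pat.reverse.foldl (fun m ch => 2 * m + (if ch ≠ c then 1 else 0)) 0 = pvMask pat c := by
  rw [List.foldl_reverse]
  unfold pvMask
  congr 1
  funext ch m
  by_cases h : ch = c <;> simp [h]

lemma pv_mask_occ (c : Char) : ∀ (l : List Char) (k : Nat),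
    (2 : Int) ^ k * pvMask l c + pvOcc l k c = (2 : Int) ^ k * ((2 : Int) ^ l.length - 1) := by
  intro l
  induction l with
  | nil => intro k; simp [pvMask, pvOcc]
  | cons x t ih =>
      intro k
      have h := ih (k + 1)
      by_cases hx : x = c <;>
        · simp only [pvMask, List.foldr_cons, pvOcc, hx, if_pos, List.length_cons] at *
          push_cast [pow_succ] at h ⊢
          nlinarith [h]

-- what A subtracts from slot q equals full minus B's mask
lemma pv_occ_mask (pat : List Char) (c : Char) :
    ((2 : Int) ^ pat.length - 1) - pvOcc pat 0 c = pvMask pat c := by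
  have h := pv_mask_occ c pat 0
  simp at h
  omega

-- the result of A's update of slot q as a function of its previous contents
def pvUpd (full : Int) (o : Option Int) (cs : List Char) (k : Nat) (c : Char) : Option Int :=
  match o with
  | none => if c ∈ cs then some (full - pvOcc cs k c) else none
  | some v => some (v - pvOcc cs k c)

-- index loop → enumerate loop (A's 'for i in range(len(pattern))' with pattern[i])
lemma pv_idx_fold (ys : List Char) (g : List (Option Int) → Int → Char → List (Option Int)) :
    ∀ (cs : List Char) (k : Nat), cs = ys.drop k → ∀ acc,
    (PySem.List.pyRange (k : Int) (ys.length : Int) 1).foldl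
        (fun da i => g da i (PySem.List.pyGetD ys i ' ')) acc
      = (PySem.List.enumerate cs (k : Int)).foldl (fun da ic => g da ic.1 ic.2) acc := by
  intro cs
  induction cs with
  | nil =>
      intro k hk acc
      have hlen : ys.length ≤ k := by
        have := List.drop_eq_nil_iff.mp hk.symm
        omega
      rw [PySem.List.pyRange_one_eq_nil (by exact_mod_cast hlen), PySem.List.enumerate_nil]
      rfl
  | cons c cs ih =>
      intro k hk acc
      have hklt : k < ys.length := by
        by_contra h
        rw [List.drop_eq_nil_iff.mpr (by omega)] at hk
        simp at hk
      have hget : ys[k]? = some c := by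
        rw [← List.head?_drop, ← hk]; rfl
      have hdrop : cs = ys.drop (k + 1) := by
        have h2 := congrArg List.tail hk
        simpa [List.tail_drop] using h2
      rw [PySem.List.pyRange_one_cons (by exact_mod_cast hklt), PySem.List.enumerate_cons,
          List.foldl_cons, List.foldl_cons]
      have hgd : PySem.List.pyGetD ys (k : Int) ' ' = c := by
        simp [PySem.List.pyGetD_natCast, List.getD_eq_getElem?_getD, hget]
      rw [hgd]
      have := ih (k + 1) hdrop (g acc (k : Int) c)
      simpa [Int.natCast_succ] using this

-- A-side invariant: slot 95 stays pinned to full, and each printable slot q evolves by pvUpd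
lemma pv_inv_A (full : Int) :
    ∀ (cs : List Char) (k : Nat) (da : List (Option Int)),
      (∀ c ∈ cs, 32 ≤ c.toNat ∧ c.toNat ≤ 126) →
      da.length = 96 → da[95]? = some (some full) →
      ((PySem.List.enumerate cs (k : Int)).foldl pvStepA da).length = 96 ∧
      ((PySem.List.enumerate cs (k : Int)).foldl pvStepA da)[95]? = some (some full) ∧
      ∀ q : Nat, q < 95 →
        ((PySem.List.enumerate cs (k : Int)).foldl pvStepA da)[q]? =
          some (pvUpd full (da[q]?.getD none) cs k (Char.ofNat (q + 32))) := by
  intro cs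
  induction cs with
  | nil =>
      intro k da _ hlen h95
      refine ⟨hlen, h95, fun q hq => ?_⟩
      rcases hda : da[q]? with _ | o
      · exact absurd (List.getElem?_eq_none_iff.mp hda) (by omega)
      · cases o <;> simp [PySem.List.enumerate_nil, pvUpd, pvOcc, hda]
  | cons x t ih =>
      intro k da hmem hlen h95
      have hx := hmem x List.mem_cons_self
      have hx32 : 32 ≤ x.toNat := hx.1
      have hpn : x.toNat - 32 < 95 := by omega
      have hpcast : ((x.toNat : Int)) - 32 = ((x.toNat - 32 : Nat) : Int) := by
        push_cast [hx32]; ring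
      -- the slot A writes in this step, and the value it writes
      rcases hda : da[x.toNat - 32]? with _ | o
      · exact absurd (List.getElem?_eq_none_iff.mp hda) (by omega)
      have hget : PySem.List.pyGetD da (((x.toNat - 32 : Nat) : Int)) none = o := by
        rw [PySem.List.pyGetD_natCast]
        simp [List.getD_eq_getElem?_getD, hda]
      have h95get : PySem.List.pyGetD da ((CHAR_RANGE : Int)) none = some full := by
        rw [show ((CHAR_RANGE : Int)) = (((95 : Nat) : Int)) from rfl, PySem.List.pyGetD_natCast]
        simp [List.getD_eq_getElem?_getD, h95]
      have hAstep : pvStepA da ((k : Int), x)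
          = da.set (x.toNat - 32)
              (some ((o.getD full) - (2 : Int) ^ k)) := by
        cases o with
        | none =>
            simp only [pvStepA, hpcast, hget, h95get, Option.map_some]
            simp [PySem.List.pySetD_natCast]
        | some v =>
            simp only [pvStepA, hpcast, hget]
            simp [PySem.List.pySetD_natCast]
      rw [PySem.List.enumerate_cons, List.foldl_cons]
      have hrec := ih (k + 1)
        (da.set (x.toNat - 32) (some ((o.getD full) - (2 : Int) ^ k)))
        (fun c hc => hmem c (List.mem_cons_of_mem _ hc))
        (by simp [hlen])
        (by rw [List.getElem?_set_ne (by omega)]; exact h95)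
      rw [hAstep, show ((k : Int) + 1) = (((k + 1 : Nat) : Int)) by push_cast; ring]
      refine ⟨hrec.1, hrec.2.1, fun q hq => ?_⟩
      rw [hrec.2.2 q hq]
      by_cases hqp : q = x.toNat - 32
      · -- the written slot: this step's character IS Char.ofNat (q+32)
        subst hqp
        have hxr : Char.ofNat (x.toNat - 32 + 32) = x := by
          rw [show x.toNat - 32 + 32 = x.toNat by omega]
          exact Char.ofNat_toNat x
        rw [List.getElem?_set_self (by omega)]
        have hoccx : pvOcc (x :: t) k x = (2 : Int) ^ k + pvOcc t (k + 1) x := by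
          simp [pvOcc]
        cases o with
        | none =>
            simp only [hda, Option.getD_some, Option.getD_none, pvUpd, hxr]
            rw [if_pos List.mem_cons_self, hoccx]
            congr 1
            ring_nf
        | some v =>
            simp only [hda, Option.getD_some, pvUpd, hxr]
            rw [hoccx]
            congr 1
            ring_nf
      · -- untouched slot: x is not this slot's character
        have hne : Char.ofNat (q + 32) ≠ x := by
          intro hcon
          have : (Char.ofNat (q + 32)).toNat = x.toNat := by rw [hcon]
          rw [pv_toNat_ofNat (q + 32) (by omega)] at this
          omega
        rw [List.getElem?_set_ne (by omega)]
        have hocc : pvOcc (x :: t) k (Char.ofNat (q + 32))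
            = pvOcc t (k + 1) (Char.ofNat (q + 32)) := by
          simp only [pvOcc]
          rw [if_neg (by intro h; exact hne h.symm)]
          ring
        rcases hdq : da[q]? with _ | oq
        · exact absurd (List.getElem?_eq_none_iff.mp hdq) (by omega)
        cases oq with
        | none =>
            simp only [Option.getD_some, pvUpd]
            rw [hocc]
            by_cases hm : Char.ofNat (q + 32) ∈ t
            · rw [if_pos hm, if_pos (List.mem_cons_of_mem _ hm)]
            · rw [if_neg hm, if_neg (by
                intro h
                rcases List.mem_cons.mp h with h | h
                · exact hne h
                · exact hm h)]
        | some v =>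
            simp only [Option.getD_some, pvUpd]
            rw [hocc]

-- B-side invariant: each printable slot holds the mask of its character iff that character was seen
lemma pv_inv_B (pat : List Char) :
    ∀ (S : List Char) (out : List (Option Int)),
      out.length = 96 →
      (S.foldl (pvStepB pat) out).length = 96 ∧
      ∀ q : Nat, q < 96 →
        (S.foldl (pvStepB pat) out)[q]? =
          if q < 95 ∧ Char.ofNat (q + 32) ∈ S then some (some (pvMask pat (Char.ofNat (q + 32))))
          else out[q]? := by
  intro S
  induction S with
  | nil => intro out hlen; exact ⟨hlen, fun q hq => by simp⟩
  | cons c S ih =>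
      intro out hlen
      rw [List.foldl_cons]
      by_cases hrange : 32 ≤ c.toNat ∧ c.toNat < 127
      · -- c writes slot c.toNat - 32
        have hpn : c.toNat - 32 < 95 := by omega
        have hpcast : ((c.toNat : Int)) - 32 = ((c.toNat - 32 : Nat) : Int) := by
          push_cast [hrange.1]; ring
        have hstep : pvStepB pat out c
            = out.set (c.toNat - 32) (some (pvMask pat c)) := by
          simp only [pvStepB, hpcast]
          rw [if_pos ⟨by positivity, by
            simp only [CHAR_RANGE]; exact_mod_cast hpn⟩]
          rw [pv_maskB_eq]
          simp [PySem.List.pySetD_natCast]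
        rw [hstep]
        obtain ⟨hlen', hpt⟩ := ih (out.set (c.toNat - 32) (some (pvMask pat c))) (by simp [hlen])
        refine ⟨hlen', fun q hq => ?_⟩
        rw [hpt q hq]
        by_cases hqp : q = c.toNat - 32
        · subst hqp
          have hxr : Char.ofNat (c.toNat - 32 + 32) = c := by
            rw [show c.toNat - 32 + 32 = c.toNat by omega]
            exact Char.ofNat_toNat c
          by_cases hm : Char.ofNat (c.toNat - 32 + 32) ∈ S
          · rw [if_pos ⟨hpn, hm⟩, if_pos ⟨hpn, List.mem_cons_of_mem _ hm⟩, hxr]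
          · rw [if_neg (by rintro ⟨_, h⟩; exact hm h),
              if_pos ⟨hpn, by rw [hxr]; exact List.mem_cons_self⟩, hxr,
              List.getElem?_set_self (by omega)]
        · have hne : Char.ofNat (q + 32) ≠ c := by
            intro hcon
            have : (Char.ofNat (q + 32)).toNat = c.toNat := by rw [hcon]
            rw [pv_toNat_ofNat (q + 32) (by omega)] at this
            omega
          rw [List.getElem?_set_ne (by omega)]
          by_cases hm : q < 95 ∧ Char.ofNat (q + 32) ∈ S
          · rw [if_pos hm, if_pos ⟨hm.1, List.mem_cons_of_mem _ hm.2⟩]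
          · rw [if_neg hm, if_neg (by
              rintro ⟨h1, h2⟩
              rcases List.mem_cons.mp h2 with h | h
              · exact hne h
              · exact hm ⟨h1, h⟩)]
      · -- c outside the printable range: nothing written
        have hstep : pvStepB pat out c = out := by
          simp only [pvStepB]
          rw [if_neg (by
            rintro ⟨h1, h2⟩
            simp only [CHAR_RANGE] at h2
            omega)]
        rw [hstep]
        obtain ⟨hlen', hpt⟩ := ih out hlen
        refine ⟨hlen', fun q hq => ?_⟩
        rw [hpt q hq]
        by_cases hm : q < 95 ∧ Char.ofNat (q + 32) ∈ S
        · rw [if_pos hm, if_pos ⟨hm.1, List.mem_cons_of_mem _ hm.2⟩]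
        · rw [if_neg hm, if_neg (by
            rintro ⟨h1, h2⟩
            rcases List.mem_cons.mp h2 with h | h
            · have hco : (Char.ofNat (q + 32)).toNat = c.toNat := by rw [h]
              rw [pv_toNat_ofNat (q + 32) (by omega)] at hco
              omega
            · exact hm ⟨h1, h⟩)]

-- final assembly
theorem create_delta_array_spec : Claim_unchanged_create_delta_array := by
  intro pattern hdom hnD
  set pat := pattern.toList with hpat
  set full : Int := (2 : Int) ^ pat.length - 1 with hfull
  -- every character of the pattern is printable (Dom gives ≤ 126 or control; ¬D_ excludes < 32)
  have hprint : ∀ c ∈ pat, 32 ≤ c.toNat ∧ c.toNat ≤ 126 := by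
    intro c hc
    have hd : pvDomChar c = true := by
      have := hdom
      unfold Dom_create_delta_array pvDomStr at this
      exact List.all_eq_true.mp this _ hc
    have hnd : ¬ c.toNat < 32 := by
      intro hlt
      apply hnD
      show (pat.foldl (fun b c => b || decide (c.toNat < 32)) false) = true
      rw [pv_foldl_or]
      simp only [Bool.false_or]
      exact List.any_eq_true.mpr ⟨c, hc, by simpa using hlt⟩
    unfold pvDomChar at hd
    simp only [Bool.or_eq_true, Bool.and_eq_true, decide_eq_true_eq, beq_iff_eq] at hd
    omega
  -- A as an enumerate fold from the initial 96-slot array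
  have hA : create_delta_array pattern
      = (PySem.List.enumerate pat 0).foldl pvStepA
          ((List.replicate 96 (none : Option Int)).set 95 (some full)) := by
    have h := pv_idx_fold pat (fun da i c => pvStepA da (i, c)) pat 0 rfl
      ((List.replicate 96 (none : Option Int)).set 95 (some full))
    refine Eq.trans ?_ (Eq.trans h ?_) <;> rfl
  obtain ⟨hlenA, h95A, hptA⟩ := pv_inv_A full pat 0
    ((List.replicate 96 (none : Option Int)).set 95 (some full)) hprint (by simp)
    (by rw [List.getElem?_set_self (by simp)])
  simp only [Nat.cast_zero] at hlenA h95A hptA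
  -- B as a fold over the sorted distinct characters from its initial array
  set S := PySem.List.sorted (PySem.Set.ofList pat) (fun x => x) false with hS
  have hB : create_delta_array_alt pattern
      = S.foldl (pvStepB pat)
          (List.replicate 95 (none : Option Int) ++ [some full]) := rfl
  obtain ⟨hlenB, hptB⟩ := pv_inv_B pat S
    (List.replicate 95 (none : Option Int) ++ [some full]) (by simp)
  have hmemS : ∀ c : Char, c ∈ S ↔ c ∈ pat := by
    intro c
    rw [hS, PySem.List.mem_sorted, PySem.Set.mem_ofList]
  show create_delta_array pattern = create_delta_array_alt pattern
  rw [hA, hB]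
  apply List.ext_getElem?
  intro q
  by_cases hq96 : q < 96
  · rw [hptB q hq96]
    by_cases hq95 : q = 95
    · subst hq95
      rw [h95A, if_neg (by rintro ⟨h, _⟩; omega)]
      rw [List.getElem?_append_right (by simp)]
      simp
    · have hq95' : q < 95 := by omega
      rw [hptA q hq95']
      have hinit : ((List.replicate 96 (none : Option Int)).set 95 (some full))[q]? = some none := by
        rw [List.getElem?_set_ne (by omega), List.getElem?_replicate, if_pos hq96]
      have hout0 : (List.replicate 95 (none : Option Int) ++ [some full])[q]? = some none := by
        rw [List.getElem?_append_left (by simp; omega), List.getElem?_replicate, if_pos hq95']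
      rw [hinit]
      by_cases hm : Char.ofNat (q + 32) ∈ pat
      · rw [if_pos ⟨hq95', (hmemS _).mpr hm⟩]
        simp only [Option.getD_some, pvUpd, if_pos hm]
        rw [pv_occ_mask]
      · rw [if_neg (by rintro ⟨_, h⟩; exact hm ((hmemS _).mp h)), hout0]
        simp [pvUpd, hm]
  · rw [List.getElem?_eq_none (by rw [hlenA]; omega), List.getElem?_eq_none (by rw [hlenB]; omega)]

set_option maxRecDepth 20000 in
theorem create_delta_array_changed : Claim_changed_create_delta_array := by
  unfold Claim_changed_create_delta_array
  refine ⟨by decide, by decide, by rfl, by rfl, by decide⟩
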